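-- pv_equiv track=rewrite | github.com/JackeyLi0201/Global_Disinfection_Path_Planner | global_planning/src/scripts/Global_modify.py | min_xiaodu
-- ===== SOURCE A (Python) =====
-- def min_xiaodu(na):
--     dis_initial=abs(na[0][0])+abs(na[0][1])
--     for i in range(len(na)):
--         dis=abs(na[i][0])+abs(na[i][1])
--         if dis<=dis_initial:
--             dis_initial=dis
--             min_index=i
--     return min_index
-- ===== SOURCE B (Python) =====
-- def min_xiaodu(na):
--     d = [abs(p[0]) + abs(p[1]) for p in na]
--     m = min(d)
--     return len(d) - 1 - d[::-1].index(m)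
-- ===== Notes on version B (the rewrite author's own statement) =====
-- stated objective: simpler
-- what changed: Replaced A's fused index-loop that tracks a running minimum and last-minimal index with a build-then-locate decomposition: build the distance table, take its minimum, and return the last occurrence as len(d)-1-d[::-1].index(min(d)).
import Mathlib
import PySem

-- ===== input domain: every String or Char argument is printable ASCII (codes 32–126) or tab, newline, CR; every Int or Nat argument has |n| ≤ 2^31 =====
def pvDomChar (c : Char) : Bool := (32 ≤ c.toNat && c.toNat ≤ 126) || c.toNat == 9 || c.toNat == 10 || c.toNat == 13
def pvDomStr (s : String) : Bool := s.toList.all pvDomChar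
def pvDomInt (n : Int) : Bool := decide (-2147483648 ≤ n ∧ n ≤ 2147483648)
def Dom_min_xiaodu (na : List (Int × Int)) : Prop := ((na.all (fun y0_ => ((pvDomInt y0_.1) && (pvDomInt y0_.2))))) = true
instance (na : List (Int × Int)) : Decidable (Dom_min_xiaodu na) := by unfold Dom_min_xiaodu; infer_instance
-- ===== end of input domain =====

-- B replaces A's fused min-tracking index loop by: build the distance table, take min, locate
-- its last occurrence via the reversed list (objective: simpler decomposition).
-- On na = [] both programs raise (A: IndexError, B: ValueError); Pre_ excludes the empty list.

-- ===== PORT A =====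
def min_xiaodu (na : List (Int × Int)) : Int :=
  -- na[0][0]: IndexError on [] is excluded by Pre_; headD is only read when na ≠ []
  let h := na.headD (0, 0)
  let dis_initial : Int := |h.1| + |h.2|
  -- for i in range(len(na)): …  ; min_index starts unbound (none); under Pre_ the i = 0
  -- iteration always assigns it, so the final .getD 0 is never the default
  let st := (PySem.List.pyRange 0 (na.length : Int) 1).foldl
    (fun (s : Int × Option Int) i =>
      let p := PySem.List.pyGetD na i (0, 0)
      let dis : Int := |p.1| + |p.2|
      if dis ≤ s.1 then (dis, some i) else s)
    (dis_initial, none)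
  st.2.getD 0

-- ===== PORT B =====
def min_xiaodu_alt (na : List (Int × Int)) : Int :=
  let d := na.map (fun p => |p.1| + |p.2|)
  -- m = min(d): ValueError on [] is excluded by Pre_
  match PySem.List.min? d (fun x => x) with
  | none => 0
  | some m =>
    -- len(d) - 1 - d[::-1].index(m); m ∈ d, so the reversed-list index always exists
    let r := (PySem.List.slice? d none none (-1)).getD []
    (d.length : Int) - 1 - ((PySem.List.index? r m).getD 0 : Nat)

-- ===== PRECONDITION & SPEC =====
-- A raises IndexError on the empty list (na[0]); excluded.
def Pre_min_xiaodu (na : List (Int × Int)) : Prop := na ≠ []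
instance (na : List (Int × Int)) : Decidable (Pre_min_xiaodu na) := by unfold Pre_min_xiaodu; infer_instance
def pvWitness_min_xiaodu : (List (Int × Int)) := [(1, -2), (0, 3), (2, 1)]
def Spec_min_xiaodu (na : List (Int × Int)) (out : Int) : Prop := out = min_xiaodu_alt na
instance (na : List (Int × Int)) (out : Int) : Decidable (Spec_min_xiaodu na out) := by unfold Spec_min_xiaodu; infer_instance

-- ===== CLAIM (what is proved, stated in full; the proofs are below) =====
def Claim_equal_min_xiaodu : Prop := ∀ (na : List (Int × Int)), Dom_min_xiaodu na → Pre_min_xiaodu na → Spec_min_xiaodu na (min_xiaodu na)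

-- ===== LEMMAS AND PROOFS =====

-- distance of a point
def pvDist (p : Int × Int) : Int := |p.1| + |p.2|

-- minimum of the distance table of h :: t
def pvMin (h : Int × Int) (t : List (Int × Int)) : Int :=
  (t.map pvDist).foldl min (pvDist h)

-- B's "last index of m": len - 1 - first index of m in the reversed table
def pvK (l : List (Int × Int)) (m : Int) : Int :=
  (l.length : Int) - 1 - ((PySem.List.index? ((l.map pvDist).reverse) m).getD 0 : Nat)

-- A's loop body on an enumerated element
def pvStep (s : Int × Option Int) (ip : Int × (Int × Int)) : Int × Option Int :=
  if pvDist ip.2 ≤ s.1 then (pvDist ip.2, some ip.1) else s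

lemma pvMin_append (h x : Int × Int) (t : List (Int × Int)) :
    pvMin h (t ++ [x]) = min (pvMin h t) (pvDist x) := by
  simp [pvMin, List.foldl_append]

lemma pvMin_mem (h : Int × Int) (t : List (Int × Int)) :
    pvMin h t ∈ (h :: t).map pvDist := by
  rcases PySem.List.foldl_min_mem (t.map pvDist) (pvDist h) with he | hm
  · simp [pvMin, he]
  · simp only [List.map_cons, List.mem_cons]
    exact Or.inr (by simpa [pvMin] using hm)

-- the invariant: the fold over the enumerated list returns (minimum, last argmin as pvK)
lemma pvMain (l : List (Int × Int)) (hne : l ≠ []) (z : Int × Int) :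
    (PySem.List.enumerate l 0).foldl pvStep (pvDist (l.headD z), none)
      = (pvMin (l.headD z) l.tail, some (pvK l (pvMin (l.headD z) l.tail))) := by
  induction l using List.reverseRecOn with
  | nil => exact absurd rfl hne
  | append_singleton l x ih =>
    rcases eq_or_ne l [] with rfl | hl
    · simp [PySem.List.enumerate, pvStep, pvMin, pvK]
    · have hhead : (l ++ [x]).headD z = l.headD z := by
        cases l with | nil => exact absurd rfl hl | cons a t => rfl
      have htail : (l ++ [x]).tail = l.tail ++ [x] := by
        cases l with | nil => exact absurd rfl hl | cons a t => rfl
      rw [PySem.List.enumerate_append, List.foldl_append, hhead, htail, ih hl, pvMin_append]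
      have hrev : ((l ++ [x]).map pvDist).reverse = pvDist x :: (l.map pvDist).reverse := by
        simp
      simp only [PySem.List.enumerate, List.foldl_cons, List.foldl_nil, pvStep]
      split_ifs with hle
      · -- new element attains the minimum: last argmin is l.length
        have hm : min (pvMin (l.headD z) l.tail) (pvDist x) = pvDist x :=
          min_eq_right hle
        rw [hm]
        unfold pvK
        rw [hrev, PySem.List.index?_cons_self]
        simp
      · -- new element is strictly larger: minimum and last argmin unchanged
        have hm : min (pvMin (l.headD z) l.tail) (pvDist x) = pvMin (l.headD z) l.tail :=
          min_eq_left (le_of_not_ge hle)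
        rw [hm]
        have hne' : pvDist x ≠ pvMin (l.headD z) l.tail := by
          intro h; exact hle (le_of_eq h)
        -- the minimum occurs in l's distance table, so index? on the reverse is some j
        have hmem : pvMin (l.headD z) l.tail ∈ (l.map pvDist).reverse := by
          rw [List.mem_reverse]
          have := pvMin_mem (l.headD z) l.tail
          cases l with
          | nil => exact absurd rfl hl
          | cons a t => simpa using this
        rcases Option.isSome_iff_exists.mp ((PySem.List.index?_isSome_iff _ _).mpr hmem) with ⟨j, hj⟩
        unfold pvK
        rw [hrev, PySem.List.index?_cons_of_ne _ hne', hj]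
        simp only [Option.map_some, Option.getD_some, List.length_append,
          List.length_cons, List.length_nil]
        refine congrArg _ (congrArg _ ?_)
        push_cast
        ring

-- ===== VERDICT (by name: the statement is the Claim_ definition above) =====
theorem min_xiaodu_spec : Claim_equal_min_xiaodu := by
  intro na _ hpre
  unfold Spec_min_xiaodu min_xiaodu min_xiaodu_alt
  -- rewrite A's range-indexed fold as a fold over the enumerated list
  have hA : (PySem.List.pyRange 0 (na.length : Int) 1).foldl
      (fun (s : Int × Option Int) i =>
        let p := PySem.List.pyGetD na i (0, 0)
        let dis : Int := |p.1| + |p.2|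
        if dis ≤ s.1 then (dis, some i) else s)
      (|(na.headD (0,0)).1| + |(na.headD (0,0)).2|, none)
      = (PySem.List.enumerate na 0).foldl pvStep (pvDist (na.headD (0,0)), none) := by
    rw [PySem.List.enumerate_eq_map_pyRange (d := (0, 0)), List.foldl_map]
    rfl
  simp only []
  rw [hA, pvMain na hpre (0, 0)]
  -- B's side: min? on the nonempty table is some (pvMin …), slice? [::-1] is reverse
  cases na with
  | nil => exact absurd rfl hpre
  | cons h t =>
    have hmin : PySem.List.min? ((h :: t).map (fun p => |p.1| + |p.2|)) (fun x => x)
        = some (pvMin h t) := by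
      simp only [List.map_cons]
      rw [PySem.List.min?_id_cons]
      rfl
    simp only [List.headD_cons, List.tail_cons] at *
    rw [hmin]
    simp only [PySem.List.slice?_none_none_neg_one, Option.getD_some]
    have hd : pvDist = fun p : Int × Int => |p.1| + |p.2| := rfl
    simp [pvK, hd]
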